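-- pv_equiv track=rewrite | github.com/yamin029/HIT137_Assignment_02 | Group_136.py | process_text
-- ===== SOURCE A (Python) =====
-- def process_text(text):
--     """
--     Process the input text to separate numbers and characters.
--
--     Args:
--         text (str): The input text to be processed.
--
--     Returns:
--         tuple: A tuple containing two lists - numbers and characters.
--     """
--     numbers = []  # List to store extracted numbers
--     chars = []    # List to store extracted characters
--     temp_num = ""  # Temporary variable to build numeric sequences
--
--     for char in text:
--         if char.isdigit():
--             temp_num += char  # If the character is a digit, add it to the temporary numeric sequence.
--         else:
--             if temp_num:
--                 numbers.append(int(temp_num))  # If a numeric sequence just ended, convert and append it.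
--                 temp_num = ""  # Reset the temporary numeric sequence.
--             if char.isalpha():
--                 chars.append(char)  # If the character is alphabetic, add it to the character list.
--
--     if temp_num:
--         numbers.append(int(temp_num))  # Add any remaining numeric sequence if present.
--
--     return numbers, chars
-- ===== SOURCE B (Python) =====
-- def process_text(text):
--     """Run-scanning re-implementation: walk the text run by run (maximal digit
--     runs vs non-digit runs) with two index pointers instead of A's per-char
--     state machine with a temp_num accumulator."""
--     numbers = []
--     chars = []
--     i, n = 0, len(text)
--     while i < n:
--         j = i
--         if text[i].isdigit():
--             while j < n and text[j].isdigit():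
--                 j += 1
--             numbers.append(int(text[i:j]))
--         else:
--             while j < n and not text[j].isdigit():
--                 j += 1
--             chars.extend(c for c in text[i:j] if c.isalpha())
--         i = j
--     return numbers, chars
-- ===== Notes on version B (the rewrite author's own statement) =====
-- stated objective: alternative
-- what changed: Replaces A's single per-character state machine (temp_num accumulator flushed at digit-run boundaries) with a two-pointer scan over maximal digit / non-digit runs: each digit run is converted to int in one slice, each non-digit run contributes its alphabetic characters.
import Mathlib
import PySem

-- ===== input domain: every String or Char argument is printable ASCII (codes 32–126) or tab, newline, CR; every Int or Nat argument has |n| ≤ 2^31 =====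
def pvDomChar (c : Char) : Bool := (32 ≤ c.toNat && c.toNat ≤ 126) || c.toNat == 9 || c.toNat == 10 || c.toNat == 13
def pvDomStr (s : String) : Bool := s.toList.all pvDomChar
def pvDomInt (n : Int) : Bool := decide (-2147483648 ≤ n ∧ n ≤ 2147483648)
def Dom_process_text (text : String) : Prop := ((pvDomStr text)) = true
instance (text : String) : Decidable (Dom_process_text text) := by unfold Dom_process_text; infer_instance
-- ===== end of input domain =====

-- B replaces A's per-char state machine (temp_num accumulator + flush logic) by a
-- two-pointer run scan over maximal digit / non-digit runs; alternative decomposition, same cost.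


-- ===== PORT A =====
-- one loop iteration of A: state = (numbers, chars, temp_num)
def pvStepA (st : List Int × List String × List Char) (c : Char) :
    List Int × List String × List Char :=
  if PySem.Chars.isdigit c then (st.1, st.2.1, st.2.2 ++ [c])
  else
    let ns := if st.2.2 ≠ [] then st.1 ++ [(PySem.Int.ofChars? st.2.2).getD 0] else st.1
    let ks := if PySem.Chars.isalpha c then st.2.1 ++ [String.ofList [c]] else st.2.1
    (ns, ks, [])

-- A's trailing "if temp_num: numbers.append(int(temp_num))" plus the return
def pvFinishA (st : List Int × List String × List Char) : List Int × List String :=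
  (if st.2.2 ≠ [] then st.1 ++ [(PySem.Int.ofChars? st.2.2).getD 0] else st.1, st.2.1)

def process_text (text : String) : List Int × List String :=
  pvFinishA (text.toList.foldl pvStepA ([], [], []))

-- ===== PORT B =====
-- B scans maximal runs: a digit run becomes one int, a non-digit run contributes its
-- alphabetic characters. takeWhile/dropWhile are the runs text[i:j] of Source B's inner whiles.
def pvRunsB : List Char → List Int × List String
  | [] => ([], [])
  | c :: cs =>
    if PySem.Chars.isdigit c then
      let r := pvRunsB (cs.dropWhile PySem.Chars.isdigit)
      ((PySem.Int.ofChars? (c :: cs.takeWhile PySem.Chars.isdigit)).getD 0 :: r.1, r.2)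
    else
      let r := pvRunsB (cs.dropWhile (fun x => !PySem.Chars.isdigit x))
      (r.1, ((c :: cs.takeWhile (fun x => !PySem.Chars.isdigit x)).filter
               PySem.Chars.isalpha).map (fun x => String.ofList [x]) ++ r.2)
termination_by l => l.length
decreasing_by
  · exact Nat.lt_succ_of_le (List.length_dropWhile_le _ _)
  · exact Nat.lt_succ_of_le (List.length_dropWhile_le _ _)

def process_text_alt (text : String) : List Int × List String :=
  pvRunsB text.toList

-- ===== PRECONDITION & SPEC =====
def Spec_process_text (text : String) (out : List Int × List String) : Prop := out = process_text_alt text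
instance (text : String) (out : List Int × List String) : Decidable (Spec_process_text text out) := by unfold Spec_process_text; infer_instance

-- ===== CLAIM (what is proved, stated in full; the proofs are below) =====
def Claim_equal_process_text : Prop := ∀ (text : String), Dom_process_text text → Spec_process_text text (process_text text)

-- ===== LEMMAS AND PROOFS =====

-- A's fold eats a whole digit run into temp_num
theorem pvFold_digit_run (l : List Char) (ns : List Int) (ks : List String)
    (temp : List Char) :
    l.foldl pvStepA (ns, ks, temp)
      = (l.dropWhile PySem.Chars.isdigit).foldl pvStepA
          (ns, ks, temp ++ l.takeWhile PySem.Chars.isdigit) := by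
  induction l generalizing temp with
  | nil => simp
  | cons c cs ih =>
    by_cases hc : PySem.Chars.isdigit c
    · simp [List.foldl_cons, pvStepA, hc, ih]
    · simp [hc]

-- after a run ends (rest empty or starting with a non-digit), flushing temp_num now or
-- letting A's loop flush it on the next character gives the same final result
theorem pvFlush_shift (rest : List Char) (ns : List Int) (ks : List String)
    (temp : List Char) (htemp : temp ≠ [])
    (hrest : rest = [] ∨ ∃ d ds, rest = d :: ds ∧ ¬ PySem.Chars.isdigit d) :
    pvFinishA (rest.foldl pvStepA (ns, ks, temp))
      = pvFinishA (rest.foldl pvStepA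
          (ns ++ [(PySem.Int.ofChars? temp).getD 0], ks, [])) := by
  rcases hrest with h | ⟨d, ds, h, hd⟩
  · subst h; simp [pvFinishA, htemp]
  · subst h; simp [List.foldl_cons, pvStepA, hd, htemp]

-- the head of dropWhile does not satisfy the predicate
theorem pvDropWhile_head (p : Char → Bool) (l : List Char) :
    l.dropWhile p = [] ∨ ∃ d ds, l.dropWhile p = d :: ds ∧ ¬ p d := by
  induction l with
  | nil => exact Or.inl rfl
  | cons c cs ih =>
    by_cases hc : p c
    · simpa [hc] using ih
    · exact Or.inr ⟨c, cs, by simp [hc], hc⟩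

-- peeling one non-digit character off B's run scan
theorem pvRunsB_cons_nondigit (c : Char) (cs : List Char)
    (hc : ¬ PySem.Chars.isdigit c) :
    pvRunsB (c :: cs)
      = ((pvRunsB cs).1,
         (if PySem.Chars.isalpha c then [String.ofList [c]] else []) ++ (pvRunsB cs).2) := by
  match cs with
  | [] => simp [pvRunsB, hc]; split <;> simp_all
  | d :: ds =>
    by_cases hd : PySem.Chars.isdigit d
    · simp [pvRunsB, hc, hd]
      split <;> simp_all
    · simp [pvRunsB, hc, hd, List.filter_cons]
      split <;> simp

-- main invariant: A's loop from state (ns, ks, "") followed by the final flush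
-- appends exactly B's run-scan results
theorem pvMain (l : List Char) (ns : List Int) (ks : List String) :
    pvFinishA (l.foldl pvStepA (ns, ks, []))
      = (ns ++ (pvRunsB l).1, ks ++ (pvRunsB l).2) := by
  match l with
  | [] => simp [pvFinishA, pvRunsB]
  | c :: cs =>
    by_cases hc : PySem.Chars.isdigit c
    · have hrun : (c :: cs).foldl pvStepA (ns, ks, [])
          = (cs.dropWhile PySem.Chars.isdigit).foldl pvStepA
              (ns, ks, c :: cs.takeWhile PySem.Chars.isdigit) := by
        simpa [List.takeWhile_cons, List.dropWhile_cons, hc]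
          using pvFold_digit_run (c :: cs) ns ks []
      rw [hrun,
        pvFlush_shift _ _ _ _ (by simp) (pvDropWhile_head _ cs),
        pvMain (cs.dropWhile PySem.Chars.isdigit)]
      simp [pvRunsB, hc]
    · have hstep : (c :: cs).foldl pvStepA (ns, ks, [])
          = cs.foldl pvStepA
              (ns, if PySem.Chars.isalpha c then ks ++ [String.ofList [c]] else ks, []) := by
        simp [List.foldl_cons, pvStepA, hc]
      rw [hstep, pvMain cs, pvRunsB_cons_nondigit c cs hc]
      split <;> simp
termination_by l.length
decreasing_by
  · exact Nat.lt_succ_of_le (List.length_dropWhile_le _ _)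
  · exact Nat.lt_succ_of_le (Nat.le_refl _)

-- ===== VERDICT (by name: the statement is the Claim_ definition above) =====
theorem process_text_spec : Claim_equal_process_text := by
  intro text _
  unfold Spec_process_text process_text process_text_alt
  simpa using pvMain text.toList [] []
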